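-- pv_equiv track=rewrite | github.com/VaninaBlas/Guias | guia7/ejercicio5-f.py | cortar_texto
-- ===== SOURCE A (Python) =====
-- def cortar_texto(t:str, sep:str)-> str:
--     """
--     Requiere: len(sep)=1
--     Devuelve: el texto que hay entre la ultima aparicion de sep y el ultimo
--     elemento de t, si no hay sep en t devuelve el texto entero
--     """
--     i:int=1
--     vr:str=""
--     texto:str=""
--     while(i<=len(t)):
--         if(t[-i] == sep ):
--             vr=vr +texto
--             i=len(t)
--         if not(sep in t):
--             vr=t
--             i=len(t)
--         texto= t[-i] + texto
--         i=i+1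
--     return vr
-- ===== SOURCE B (Python) =====
-- def cortar_texto(t: str, sep: str) -> str:
--     # Single forward pass: remember the index of the last occurrence of sep,
--     # then return the slice after it (whole string if sep never occurs).
--     last = -1
--     for i, ch in enumerate(t):
--         if ch == sep:
--             last = i
--     return t[last + 1:]
-- ===== Notes on version B (the rewrite author's own statement) =====
-- stated objective: simpler
-- what changed: Replaces A's backward character-by-character scan that builds the result string by repeated prepending (with an in-loop 'sep in t' re-check) by a single forward pass that only maintains the integer index of the last separator seen, finished by one slice t[last+1:].
-- outside the precondition, e.g. on cortar_texto('ab', ''): A returns '', B returns 'ab'; on cortar_texto('abc', 'bc'): A returns '', B returns 'abc'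
import Mathlib
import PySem

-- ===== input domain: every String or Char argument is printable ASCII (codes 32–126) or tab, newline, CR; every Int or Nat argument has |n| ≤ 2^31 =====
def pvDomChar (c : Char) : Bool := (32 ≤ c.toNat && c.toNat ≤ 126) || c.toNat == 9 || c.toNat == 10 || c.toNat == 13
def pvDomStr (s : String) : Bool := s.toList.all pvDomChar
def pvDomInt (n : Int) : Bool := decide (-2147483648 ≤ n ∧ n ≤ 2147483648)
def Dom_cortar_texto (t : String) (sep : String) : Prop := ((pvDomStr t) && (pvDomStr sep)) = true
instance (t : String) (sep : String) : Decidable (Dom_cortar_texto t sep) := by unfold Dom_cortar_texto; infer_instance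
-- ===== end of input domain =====

-- B replaces A's backward scan that builds the output string by repeated prepending with a
-- forward pass keeping only the index of the last separator, finished by one slice (simpler).

-- ===== PORT A =====
-- A's while loop: state (i, vr, texto); Python's t[-i] is a 1-char string, modelled as [c]
-- for the fetched Char; fuel = len t + 1 bounds the iteration count (i grows by ≥ 1 per turn).
def cortarLoopA (L sepL : List Char) : Nat → Int → List Char → List Char → List Char
  | 0, _, vr, _ => vr
  | fuel+1, i, vr, texto =>
    if i ≤ (L.length : Int) then
      match PySem.List.pyGet? L (-i) with
      | none => vr   -- IndexError: unreachable for 1 ≤ i ≤ len L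
      | some c =>
        let s1 := if [c] = sepL then (vr ++ texto, (L.length : Int)) else (vr, i)
        let s2 := if PySem.Chars.isIn sepL L = false then (L, (L.length : Int)) else s1
        match PySem.List.pyGet? L (-s2.2) with
        | none => s2.1  -- IndexError: unreachable
        | some c2 => cortarLoopA L sepL fuel (s2.2 + 1) s2.1 (c2 :: texto)
    else vr

def cortar_texto (t : String) (sep : String) : String :=
  String.ofList (cortarLoopA t.toList sep.toList (t.toList.length + 1) 1 [] [])

-- ===== PORT B =====
def cortar_texto_alt (t : String) (sep : String) : String :=
  let last : Int :=
    (PySem.List.enumerate t.toList 0).foldl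
      (fun acc p => if [p.2] = sep.toList then p.1 else acc) (-1)
  String.ofList (PySem.List.slice t.toList (some (last + 1)) none)

-- ===== PRECONDITION & SPEC =====
-- A's docstring requires len(sep) = 1. Pre_ additionally keeps longer/empty separators that do
-- not occur in t (both programs return t there); it excludes only separators of length ≠ 1 that
-- do occur as a substring of t — outside the documented domain, where neither A's nor B's value
-- is specified (both are accidental fallbacks of never matching a single character).
def Pre_cortar_texto (t : String) (sep : String) : Prop :=
  sep.toList.length = 1 ∨ PySem.Str.isIn sep t = false
instance (t : String) (sep : String) : Decidable (Pre_cortar_texto t sep) := by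
  unfold Pre_cortar_texto; infer_instance
def pvWitness_cortar_texto : String × String := ("a,b,c", ",")

def Spec_cortar_texto (t : String) (sep : String) (out : String) : Prop := out = cortar_texto_alt t sep
instance (t : String) (sep : String) (out : String) : Decidable (Spec_cortar_texto t sep out) := by unfold Spec_cortar_texto; infer_instance

-- ===== CLAIM (what is proved, stated in full; the proofs are below) =====
def Claim_equal_cortar_texto : Prop := ∀ (t : String) (sep : String), Dom_cortar_texto t sep → Pre_cortar_texto t sep → Spec_cortar_texto t sep (cortar_texto t sep)

-- ===== LEMMAS AND PROOFS =====

-- common target of both ports: the characters after the last occurrence of c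
def afterLast (c : Char) (L : List Char) : List Char :=
  (L.reverse.takeWhile (fun x => x != c)).reverse

theorem takeWhile_eq_take_of (p : Char → Bool) : ∀ (R : List Char) (k : Nat) (v : Char),
    R[k]? = some v → (∀ x ∈ R.take k, p x = true) → p v = false → R.takeWhile p = R.take k := by
  intro R
  induction R with
  | nil => intro k v hv; simp at hv
  | cons x xs ih =>
    intro k v hv hall hc
    cases k with
    | zero =>
      simp at hv; subst hv; simp [hc]
    | succ m =>
      have hx : p x = true := hall x (by simp)
      simp only [List.take_succ_cons, List.takeWhile_cons, hx, if_true]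
      rw [ih m v (by simpa using hv) (fun y hy => hall y (by simp [hy])) hc]

theorem loopA_exit (L sepL : List Char) (f : Nat) (i : Int) (vr texto : List Char)
    (h : (L.length : Int) < i) : cortarLoopA L sepL f i vr texto = vr := by
  cases f with
  | zero => rfl
  | succ f => simp [cortarLoopA, not_le.mpr h]

theorem loopA_spec (L : List Char) (c : Char) (hc : c ∈ L) :
    ∀ (fuel k : Nat) (vr texto : List Char),
      k ≤ L.length → L.length - k < fuel →
      (∀ x ∈ L.reverse.take k, x ≠ c) →
      texto = (L.reverse.take k).reverse →
      cortarLoopA L [c] fuel ((k : Int) + 1) vr texto = vr ++ afterLast c L := by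
  intro fuel
  induction fuel with
  | zero => intro k vr texto _ hf; omega
  | succ f ih =>
    intro k vr texto hk hf hall htexto
    have hkn : k < L.length := by
      rcases Nat.lt_or_ge k L.length with h | h
      · exact h
      · exfalso
        have hkeq : k = L.length := le_antisymm hk h
        exact hall c (by simp [hkeq, List.take_of_length_le, hc]) rfl
    obtain ⟨r, hr⟩ : ∃ r, L.reverse[k]? = some r :=
      ⟨L.reverse[k]'(by simpa using hkn), List.getElem?_eq_getElem (by simpa using hkn)⟩
    have hcond : ((k : Int) + 1) ≤ (L.length : Int) := by exact_mod_cast hkn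
    have hget : PySem.List.pyGet? L (-((k : Int) + 1)) = some r := by
      have := PySem.List.pyGet?_neg_natCast (xs := L) (k := k+1)
        (Nat.succ_pos k) (by omega : k + 1 ≤ L.length)
      rw [show (-((k:Int)+1)) = -((k+1 : Nat) : Int) by push_cast; ring, this, ← hr,
        List.getElem?_reverse (by simpa using hkn)]
      congr 1
      omega
    have hIn : PySem.Chars.isIn [c] L = true := by
      rw [PySem.Chars.isIn_iff_infix]; exact (List.singleton_infix_iff c L).mpr hc
    have htake : L.reverse.take (k+1) = L.reverse.take k ++ [r] := by
      rw [List.take_add_one, hr]; rfl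
    by_cases hxc : r = c
    · -- hit: vr becomes vr ++ texto and i jumps to len L, the loop exits next turn
      have htw : L.reverse.takeWhile (fun x => x != c) = L.reverse.take k :=
        takeWhile_eq_take_of _ L.reverse k r hr
          (fun x hx => by simpa using hall x hx) (by simp [hxc])
      have hn1 : (0:Nat) < L.length := by omega
      have hget0 : PySem.List.pyGet? L (-(L.length : Int)) = some L[0] := by
        rw [PySem.List.pyGet?_neg_natCast (xs := L) (k := L.length) hn1 le_rfl]
        simp [List.getElem?_eq_getElem hn1]
      simp only [cortarLoopA, if_pos hcond, hget, hxc, hIn,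
        Bool.true_eq_false, if_true, if_false]
      rw [hget0]
      dsimp only
      rw [loopA_exit _ _ _ _ _ _ (by omega)]
      rw [afterLast, htw, htexto]
    · -- miss: texto grows by one character from the end, i steps forward
      have hne : ¬ ([r] = [c]) := by simp [hxc]
      simp only [cortarLoopA, if_pos hcond, hget, if_neg hne, hIn,
        Bool.true_eq_false, if_false]
      rw [show (k:Int) + 1 + 1 = ((k+1 : Nat) : Int) + 1 by push_cast; ring]
      apply ih (k+1) vr _ hkn (by omega)
      · intro x hx
        rw [htake] at hx
        rcases List.mem_append.mp hx with h | h
        · exact hall x h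
        · simp at h; subst h; exact hxc
      · rw [htake, htexto]; simp

-- when sep never matches a character and does not occur, A's first iteration copies t and exits
theorem cortarA_of_not_in (L sepL : List Char)
    (hne : ∀ r ∈ L, ¬([r] = sepL)) (hIn : PySem.Chars.isIn sepL L = false) :
    cortarLoopA L sepL (L.length + 1) 1 [] [] = L := by
  rcases L.eq_nil_or_concat with hL | ⟨as, a, hL⟩
  · subst hL; rfl
  · have hlen : 0 < L.length := by rw [hL]; simp
    have hcond : (1:Int) ≤ (L.length : Int) := by exact_mod_cast hlen
    have hr : PySem.List.pyGet? L (-1) = some a := by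
      rw [hL, List.concat_eq_append]; exact PySem.List.pyGet?_neg_one_append_singleton as a
    have hrc : ¬ ([a] = sepL) := hne a (by rw [hL]; simp)
    have hget0 : PySem.List.pyGet? L (-(L.length : Int)) = some (L[0]'hlen) := by
      rw [PySem.List.pyGet?_neg_natCast (xs := L) (k := L.length) hlen le_rfl]
      simp [List.getElem?_eq_getElem hlen]
    have hstep : cortarLoopA L sepL (L.length + 1) 1 [] [] =
        cortarLoopA L sepL L.length ((L.length : Int) + 1) L ([L[0]'hlen]) := by
      simp only [cortarLoopA, if_pos hcond, hr, if_neg hrc, hIn, if_true]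
      rw [hget0]
    rw [hstep, loopA_exit _ _ _ _ _ _ (by omega)]

theorem cortarA_eq (L : List Char) (c : Char) :
    cortarLoopA L [c] (L.length + 1) 1 [] [] = afterLast c L := by
  by_cases hc : c ∈ L
  · have := loopA_spec L c hc (L.length + 1) 0 [] [] (Nat.zero_le _) (by omega)
      (by simp) (by simp)
    simpa using this
  · rw [cortarA_of_not_in L [c]
      (fun r hr => by simp; rintro rfl; exact hc hr)
      (by rw [PySem.Chars.isIn_eq_false_iff, List.singleton_infix_iff]; exact hc)]
    have htw : L.reverse.takeWhile (fun x => x != c) = L.reverse := by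
      rw [List.takeWhile_eq_self_iff]
      intro x hx
      have hxL : x ∈ L := List.mem_reverse.mp hx
      simp; rintro rfl; exact hc hxL
    rw [afterLast, htw, List.reverse_reverse]

-- when sep never matches a character, B's loop keeps last = -1 and the slice is all of t
theorem lastFoldl_no_match (L sepL : List Char) (hne : ∀ r ∈ L, ¬([r] = sepL)) :
    (PySem.List.enumerate L 0).foldl
      (fun acc p => if [p.2] = sepL then p.1 else acc) (-1 : Int) = -1 := by
  have h : ∀ (acc : Int) (p : Int × Char), p ∈ PySem.List.enumerate L 0 →
      (if [p.2] = sepL then p.1 else acc) = (fun (acc : Int) (_ : Int × Char) => acc) acc p := by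
    intro acc p hp
    obtain ⟨k, hk, rfl⟩ := (PySem.List.mem_enumerate_iff _ _ _).mp hp
    simp [hne _ (List.getElem_mem hk)]
  rw [PySem.List.foldl_congr_mem _ _ _ _ h, PySem.List.foldl_ignore]

-- B's loop value: index of the last occurrence of c, or -1
def lastOf (c : Char) (L : List Char) : Int :=
  (PySem.List.enumerate L 0).foldl (fun acc p => if [p.2] = [c] then p.1 else acc) (-1)

theorem lastOf_concat (c : Char) (L : List Char) (x : Char) :
    lastOf c (L ++ [x]) = if x = c then (L.length : Int) else lastOf c L := by
  rw [lastOf, PySem.List.enumerate_append, List.foldl_append]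
  simp only [PySem.List.enumerate_cons, PySem.List.enumerate_nil, List.foldl_cons, List.foldl_nil]
  by_cases hx : x = c <;> simp [hx, lastOf]

theorem lastOf_bounds (c : Char) : ∀ (L : List Char), -1 ≤ lastOf c L ∧ lastOf c L < L.length := by
  intro L
  induction L using List.reverseRecOn with
  | nil => simp [lastOf, PySem.List.enumerate_nil]
  | append_singleton L x ih =>
    rw [lastOf_concat]
    by_cases hx : x = c <;> simp [hx] <;> omega

theorem cortarB_eq (L : List Char) (c : Char) :
    PySem.List.slice L (some (lastOf c L + 1)) none = afterLast c L := by
  induction L using List.reverseRecOn with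
  | nil => rfl
  | append_singleton L x ih =>
    rw [lastOf_concat]
    by_cases hx : x = c
    · rw [if_pos hx]
      rw [show (L.length : Int) + 1 = ((L.length + 1 : Nat) : Int) by push_cast; ring,
        PySem.List.slice_from_natCast]
      rw [List.drop_eq_nil_of_le (by simp)]
      rw [afterLast]
      simp [hx]
    · rw [if_neg hx]
      have hb := lastOf_bounds c L
      set m : Nat := (lastOf c L + 1).toNat with hm
      have hmi : lastOf c L + 1 = (m : Int) := by omega
      have hml : m ≤ L.length := by omega
      rw [hmi, PySem.List.slice_from_natCast] at ih ⊢
      rw [List.drop_append_of_le_length hml, ih, afterLast, afterLast]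
      simp [hx]

-- cortarB_eq with lastOf unfolded, in the exact shape of cortar_texto_alt's body
theorem cortarB_eq' (L : List Char) (c : Char) :
    PySem.List.slice L
      (some (((PySem.List.enumerate L 0).foldl
        (fun acc p => if [p.2] = [c] then p.1 else acc) (-1)) + 1)) none = afterLast c L :=
  cortarB_eq L c

-- ===== VERDICT (by name: the statement is the Claim_ definition above) =====
theorem cortar_texto_spec : Claim_equal_cortar_texto := by
  intro t sep _ hpre
  by_cases hlen : sep.toList.length = 1
  · obtain ⟨c, hc⟩ : ∃ c, sep.toList = [c] := by
      rcases h : sep.toList with _ | ⟨c, rest⟩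
      · simp [h] at hlen
      · rcases rest with _ | _
        · exact ⟨c, rfl⟩
        · simp [h] at hlen
    simp only [Spec_cortar_texto, cortar_texto, cortar_texto_alt, hc]
    rw [cortarA_eq t.toList c, cortarB_eq' t.toList c]
  · have hIn : PySem.Str.isIn sep t = false := hpre.resolve_left hlen
    have hne : ∀ r ∈ t.toList, ¬([r] = sep.toList) := by
      intro r _ h
      exact hlen (by rw [← h]; rfl)
    simp only [Spec_cortar_texto, cortar_texto, cortar_texto_alt]
    rw [cortarA_of_not_in t.toList sep.toList hne (by simpa using hIn),
      lastFoldl_no_match t.toList sep.toList hne]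
    norm_num [PySem.List.slice_none_none]
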